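-- pv_equiv track=rewrite | github.com/arlegotin/eml-symbolic-regression | src/eml_symbolic_regression/geml_package.py | _family_from_tags
-- ===== SOURCE A (Python) =====
-- from typing import Any, Iterable, Mapping
--
-- def _family_from_tags(tags: Iterable[Any]) -> str:
--     values = {str(tag) for tag in tags}
--     if "negative_control" in values:
--         return "negative_control"
--     if "log_periodic" in values:
--         return "log_periodic"
--     if "damped_oscillation" in values:
--         return "damped_oscillation"
--     if "standing_wave" in values:
--         return "standing_wave"
--     if "harmonic" in values:
--         return "harmonic"
--     if "periodic" in values:
--         return "periodic"
--     return "unknown"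
-- ===== SOURCE B (Python) =====
-- _RANK = {
--     "negative_control": 0,
--     "log_periodic": 1,
--     "damped_oscillation": 2,
--     "standing_wave": 3,
--     "harmonic": 4,
--     "periodic": 5,
-- }
--
-- def _family_from_tags(tags):
--     best = None
--     for tag in tags:
--         name = str(tag)
--         r = _RANK.get(name)
--         if r is not None and (best is None or r < best[0]):
--             best = (r, name)
--     return "unknown" if best is None else best[1]
-- ===== Notes on version B (the rewrite author's own statement) =====
-- stated objective: alternative
-- what changed: Replaces the set comprehension plus six ordered membership checks with a single pass over the tags that keeps the minimum priority rank (and its name) seen so far, via a name-to-rank dict.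
import Mathlib
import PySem

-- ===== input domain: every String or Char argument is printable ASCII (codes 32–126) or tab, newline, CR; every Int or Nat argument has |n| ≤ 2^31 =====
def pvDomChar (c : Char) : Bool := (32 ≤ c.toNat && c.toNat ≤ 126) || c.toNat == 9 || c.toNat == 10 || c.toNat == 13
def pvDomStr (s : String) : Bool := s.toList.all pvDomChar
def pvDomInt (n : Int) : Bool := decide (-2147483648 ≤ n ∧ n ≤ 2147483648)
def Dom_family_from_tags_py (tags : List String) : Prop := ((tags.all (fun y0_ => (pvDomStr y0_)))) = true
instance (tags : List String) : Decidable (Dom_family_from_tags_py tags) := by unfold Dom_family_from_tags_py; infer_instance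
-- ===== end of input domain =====

-- B replaces the set build plus six ordered membership checks with one pass keeping the minimum priority rank; alternative decomposition, same cost.

-- ===== PORT A =====
def family_from_tags_py (tags : List String) : String :=
  let values : PySem.Set String := PySem.Set.ofList tags
  if "negative_control" ∈ values then "negative_control"
  else if "log_periodic" ∈ values then "log_periodic"
  else if "damped_oscillation" ∈ values then "damped_oscillation"
  else if "standing_wave" ∈ values then "standing_wave"
  else if "harmonic" ∈ values then "harmonic"
  else if "periodic" ∈ values then "periodic"
  else "unknown"

-- ===== PORT B =====
def pvRank : PySem.Dict String Int :=
  PySem.Dict.ofList [("negative_control", 0), ("log_periodic", 1), ("damped_oscillation", 2),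
                     ("standing_wave", 3), ("harmonic", 4), ("periodic", 5)]

def pvStep (best : Option (Int × String)) (name : String) : Option (Int × String) :=
  match pvRank.get? name with
  | none => best
  | some r =>
    match best with
    | none => some (r, name)
    | some b => if r < b.1 then some (r, name) else some b

def family_from_tags_py_alt (tags : List String) : String :=
  match tags.foldl pvStep none with
  | none => "unknown"
  | some b => b.2

-- ===== PRECONDITION & SPEC =====
def Spec_family_from_tags_py (tags : List String) (out : String) : Prop := out = family_from_tags_py_alt tags
instance (tags : List String) (out : String) : Decidable (Spec_family_from_tags_py tags out) := by unfold Spec_family_from_tags_py; infer_instance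

-- ===== CLAIM (what is proved, stated in full; the proofs are below) =====
def Claim_equal_family_from_tags_py : Prop := ∀ (tags : List String), Dom_family_from_tags_py tags → Spec_family_from_tags_py tags (family_from_tags_py tags)

-- ===== LEMMAS AND PROOFS =====

def pvInv (best : Option (Int × String)) : Prop :=
  best = none ∨ best = some (0, "negative_control") ∨ best = some (1, "log_periodic") ∨
  best = some (2, "damped_oscillation") ∨ best = some (3, "standing_wave") ∨
  best = some (4, "harmonic") ∨ best = some (5, "periodic")

def pvChain (tags : List String) (best : Option (Int × String)) : Option (Int × String) :=
  if "negative_control" ∈ tags ∨ best = some (0, "negative_control") then some (0, "negative_control")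
  else if "log_periodic" ∈ tags ∨ best = some (1, "log_periodic") then some (1, "log_periodic")
  else if "damped_oscillation" ∈ tags ∨ best = some (2, "damped_oscillation") then some (2, "damped_oscillation")
  else if "standing_wave" ∈ tags ∨ best = some (3, "standing_wave") then some (3, "standing_wave")
  else if "harmonic" ∈ tags ∨ best = some (4, "harmonic") then some (4, "harmonic")
  else if "periodic" ∈ tags ∨ best = some (5, "periodic") then some (5, "periodic")
  else none

lemma rank_spec (t : String) :
    pvRank.get? t =
      if t = "negative_control" then some 0
      else if t = "log_periodic" then some 1
      else if t = "damped_oscillation" then some 2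
      else if t = "standing_wave" then some 3
      else if t = "harmonic" then some 4
      else if t = "periodic" then some 5
      else none := by
  have hmk : pvRank = PySem.Dict.mk [("negative_control", 0), ("log_periodic", 1), ("damped_oscillation", 2),
      ("standing_wave", 3), ("harmonic", 4), ("periodic", 5)] := by rfl
  rw [hmk]
  split_ifs with h0 h1 h2 h3 h4 h5
  · subst h0; rfl
  · subst h1; rfl
  · subst h2; rfl
  · subst h3; rfl
  · subst h4; rfl
  · subst h5; rfl
  · simp [PySem.Dict.get?, Ne.symm h0, Ne.symm h1, Ne.symm h2, Ne.symm h3, Ne.symm h4, Ne.symm h5]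

set_option maxHeartbeats 2000000 in
lemma loop_eq (tags : List String) (best : Option (Int × String)) (h : pvInv best) :
    tags.foldl pvStep best = pvChain tags best := by
  induction tags generalizing best with
  | nil =>
    rcases h with h | h | h | h | h | h | h <;> subst h <;> simp [pvChain]
  | cons t ts ih =>
    have hstep : pvInv (pvStep best t) := by
      unfold pvStep
      rw [rank_spec]
      split_ifs with h0 h1 h2 h3 h4 h5 <;>
        rcases h with h | h | h | h | h | h | h <;> subst h <;>
        simp_all [pvInv]
    rw [List.foldl_cons, ih _ hstep]
    unfold pvChain pvStep
    rw [rank_spec]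
    rcases h with h | h | h | h | h | h | h <;> subst h <;>
      by_cases h0 : t = "negative_control" <;>
      by_cases h1 : t = "log_periodic" <;>
      by_cases h2 : t = "damped_oscillation" <;>
      by_cases h3 : t = "standing_wave" <;>
      by_cases h4 : t = "harmonic" <;>
      by_cases h5 : t = "periodic" <;>
      simp_all <;> split_ifs <;> simp_all

-- ===== VERDICT (by name: the statement is the Claim_ definition above) =====
theorem family_from_tags_py_spec : Claim_equal_family_from_tags_py := by
  intro tags _
  unfold Spec_family_from_tags_py family_from_tags_py family_from_tags_py_alt
  rw [loop_eq tags none (Or.inl rfl)]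
  unfold pvChain
  simp only [PySem.Set.mem_ofList, or_false, reduceCtorEq]
  split_ifs <;> rfl
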